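-- pv_equiv track=rewrite | github.com/Avilad0/LeetCode | 2554_MaximumNumberOfIntegersToChooseFromARangeI.py | maxCount
-- ===== SOURCE A (Python) =====
-- from typing import List
--
-- def maxCount(banned: List[int], n: int, maxSum: int) -> int:
--     bannedSet = set(banned)
--     count = 0
--     for i in range(1,n+1):
--         if i in bannedSet:
--             continue
--         if i <= maxSum:
--             maxSum-=i
--             count+=1
--         else:
--             return count
--
--     return count
-- ===== SOURCE B (Python) =====
-- def maxCount(banned, n, maxSum):
--     # Alternative algorithm: process the banned-free gaps between sorted
--     # banned values; take each gap wholesale via the triangular-sum formula,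
--     # binary-searching the overflow point inside the gap where the budget
--     # runs out.
--     bs = sorted({b for b in banned if 1 <= b <= n})
--     count = 0
--     s = 0       # sum of everything taken so far
--     prev = 0
--     for b in bs + [n + 1]:
--         lo, hi = prev + 1, b - 1
--         if lo <= hi:
--             if s + lo > maxSum:
--                 return count
--             # largest k in [lo, hi] with s + (k+lo)*(k-lo+1)//2 <= maxSum
--             lo2, hi2 = lo, hi
--             while lo2 < hi2:
--                 mid = (lo2 + hi2 + 1) // 2
--                 if s + (mid + lo) * (mid - lo + 1) // 2 <= maxSum:
--                     lo2 = mid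
--                 else:
--                     hi2 = mid - 1
--             k = lo2
--             s += (k + lo) * (k - lo + 1) // 2
--             count += k - lo + 1
--             if k < hi:
--                 return count
--         prev = b
--     return count
-- ===== Notes on version B (the rewrite author's own statement) =====
-- stated objective: alternative
-- what changed: Instead of walking every integer 1..n subtracting from the budget, B sorts the distinct in-range banned values, takes each banned-free gap wholesale with the triangular-number closed form, and binary-searches inside the overflow gap for the exact stopping point.
import Mathlib
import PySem

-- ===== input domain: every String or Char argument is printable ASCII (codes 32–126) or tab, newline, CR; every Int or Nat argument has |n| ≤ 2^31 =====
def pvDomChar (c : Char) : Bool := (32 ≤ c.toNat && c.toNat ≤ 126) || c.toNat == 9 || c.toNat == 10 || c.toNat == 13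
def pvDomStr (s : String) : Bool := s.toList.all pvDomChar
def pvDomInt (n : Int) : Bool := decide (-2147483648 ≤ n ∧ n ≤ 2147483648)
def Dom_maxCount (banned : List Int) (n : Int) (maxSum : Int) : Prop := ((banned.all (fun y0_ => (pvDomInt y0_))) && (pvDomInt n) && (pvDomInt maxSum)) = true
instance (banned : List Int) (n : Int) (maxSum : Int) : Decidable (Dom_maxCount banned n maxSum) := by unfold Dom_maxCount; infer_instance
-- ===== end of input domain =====

-- B replaces A's element-by-element walk over 1..n by sorting the distinct in-range
-- banned values, summing each banned-free gap with the triangular closed form and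
-- binary-searching the overflow point (objective: alternative algorithm, same result).

-- ===== PORT A =====
-- the for-loop over range(1, n+1) with its early return; the loop counter i walks up,
-- fuel = number of remaining iterations (range(1,n+1) is lazy in Python, so the port
-- recurses on the counter instead of materializing the range)
def maxCountA_go (bset : List Int) : Nat → Int → Int → Int → Int
  | 0, _, count, _ => count
  | f + 1, i, count, m =>
    if bset.contains i then maxCountA_go bset f (i + 1) count m
    else if i ≤ m then maxCountA_go bset f (i + 1) (count + 1) (m - i)
    else count

def maxCount (banned : List Int) (n : Int) (maxSum : Int) : Int :=
  let bannedSet := PySem.Set.ofList banned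
  maxCountA_go bannedSet (n + 1 - 1).toNat 1 0 maxSum

-- ===== PORT B =====
-- while lo2 < hi2: mid = (lo2+hi2+1)//2; keep mid if the prefix sum still fits
-- (structural recursion on the interval width (hi2-lo2).toNat, which shrinks each iteration)
def maxCountB_searchGo (s maxSum lo : Int) : Nat → Int → Int → Int
  | 0, lo2, _ => lo2
  | f + 1, lo2, hi2 =>
    if lo2 < hi2 then
      let mid := PySem.Int.floordiv (lo2 + hi2 + 1) 2
      if s + PySem.Int.floordiv ((mid + lo) * (mid - lo + 1)) 2 ≤ maxSum then
        maxCountB_searchGo s maxSum lo f mid hi2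
      else
        maxCountB_searchGo s maxSum lo f lo2 (mid - 1)
    else lo2

def maxCountB_search (s maxSum lo lo2 hi2 : Int) : Int :=
  maxCountB_searchGo s maxSum lo (hi2 - lo2).toNat lo2 hi2

-- the for-loop over bs ++ [n+1], as structural recursion with early returns
def maxCountB_go (maxSum : Int) : List Int → Int → Int → Int → Int
  | [], count, _, _ => count
  | b :: rest, count, s, prev =>
    let lo := prev + 1
    let hi := b - 1
    if lo ≤ hi then
      if s + lo > maxSum then count
      else
        let k := maxCountB_search s maxSum lo lo hi
        let s' := s + PySem.Int.floordiv ((k + lo) * (k - lo + 1)) 2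
        let count' := count + (k - lo + 1)
        if k < hi then count'
        else maxCountB_go maxSum rest count' s' b
    else maxCountB_go maxSum rest count s b

def maxCount_alt (banned : List Int) (n : Int) (maxSum : Int) : Int :=
  let bs := PySem.List.sorted (PySem.Set.ofList (banned.filter (fun b => decide (1 ≤ b ∧ b ≤ n)))) (fun x => x) false
  maxCountB_go maxSum (bs ++ [n + 1]) 0 0 0

-- ===== PRECONDITION & SPEC =====
def Spec_maxCount (banned : List Int) (n : Int) (maxSum : Int) (out : Int) : Prop := out = maxCount_alt banned n maxSum
instance (banned : List Int) (n : Int) (maxSum : Int) (out : Int) : Decidable (Spec_maxCount banned n maxSum out) := by unfold Spec_maxCount; infer_instance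

-- ===== CLAIM (what is proved, stated in full; the proofs are below) =====
def Claim_equal_maxCount : Prop := ∀ (banned : List Int) (n : Int) (maxSum : Int), Dom_maxCount banned n maxSum → Spec_maxCount banned n maxSum (maxCount banned n maxSum)


-- ===== LEMMAS AND PROOFS =====

-- tri lo k = the port's closed form for lo + (lo+1) + ... + k  (0 when k = lo-1)
def tri (lo k : Int) : Int := PySem.Int.floordiv ((k + lo) * (k - lo + 1)) 2

theorem tri_double (lo k : Int) : 2 * tri lo k = (k + lo) * (k - lo + 1) := by
  have hpar : ∃ t, (k + lo) * (k - lo + 1) = 2 * t := by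
    rcases Int.even_or_odd (k + lo) with ⟨t, ht⟩ | ⟨t, ht⟩
    · exact ⟨t * (k - lo + 1), by rw [ht]; ring⟩
    · have h2 : k - lo + 1 = 2 * (k - t) := by omega
      exact ⟨(k + lo) * (k - t), by rw [h2]; ring⟩
  obtain ⟨t, ht⟩ := hpar
  have htri : tri lo k = t := by
    unfold tri
    rw [ht, PySem.Int.floordiv_eq_iff_of_pos (by omega : (0:Int) < 2)]
    omega
  omega

theorem tri_succ (lo k : Int) : tri lo (k + 1) = tri lo k + (k + 1) := by
  have h1 := tri_double lo k
  have h2 := tri_double lo (k + 1)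
  have h3 : (k + 1 + lo) * (k + 1 - lo + 1) = (k + lo) * (k - lo + 1) + 2 * (k + 1) := by ring
  omega

theorem tri_self (lo : Int) : tri lo lo = lo := by
  have h1 := tri_double lo lo
  have h2 : (lo + lo) * (lo - lo + 1) = 2 * lo := by ring
  omega

theorem tri_base (lo : Int) : tri lo (lo - 1) = 0 := by
  have h1 := tri_double lo (lo - 1)
  have h2 : (lo - 1 + lo) * (lo - 1 - lo + 1) = 2 * 0 := by ring
  omega

theorem tri_shift (lo k : Int) : tri (lo + 1) k = tri lo k - lo := by
  have h1 := tri_double lo k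
  have h2 := tri_double (lo + 1) k
  have h3 : (k + (lo + 1)) * (k - (lo + 1) + 1) = (k + lo) * (k - lo + 1) - 2 * lo := by ring
  omega

theorem tri_mono (lo a b : Int) (hlo : 1 ≤ lo) (hla : lo - 1 ≤ a) (hab : a ≤ b) :
    tri lo a ≤ tri lo b := by
  have h : ∀ d : Nat, ∀ b : Int, (b - a).toNat = d → a ≤ b → tri lo a ≤ tri lo b := by
    intro d
    induction d with
    | zero =>
      intro b hd hab2
      have he : a = b := by omega
      rw [he]
    | succ d ih =>
      intro b hd hab2
      have hb : a ≤ b - 1 := by omega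
      have h1 := ih (b - 1) (by omega) hb
      have hs := tri_succ lo (b - 1)
      have he : b - 1 + 1 = b := by omega
      rw [he] at hs
      omega
  exact h (b - a).toNat b rfl hab

theorem search_specGo (s maxSum lo : Int) : ∀ f : Nat, ∀ lo2 hi2 : Int, (hi2 - lo2).toNat ≤ f →
    lo2 ≤ hi2 → tri lo lo2 ≤ maxSum - s →
    lo2 ≤ maxCountB_searchGo s maxSum lo f lo2 hi2 ∧
    maxCountB_searchGo s maxSum lo f lo2 hi2 ≤ hi2 ∧
    tri lo (maxCountB_searchGo s maxSum lo f lo2 hi2) ≤ maxSum - s ∧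
    (maxCountB_searchGo s maxSum lo f lo2 hi2 < hi2 →
      maxSum - s < tri lo (maxCountB_searchGo s maxSum lo f lo2 hi2 + 1)) := by
  intro f
  induction f with
  | zero =>
    intro lo2 hi2 hf h1 h2
    have he : lo2 = hi2 := by omega
    simp only [maxCountB_searchGo]
    exact ⟨le_rfl, by omega, h2, by omega⟩
  | succ f ih =>
    intro lo2 hi2 hf h1 h2
    by_cases h : lo2 < hi2
    · have hmid : PySem.Int.floordiv (lo2 + hi2 + 1) 2 = (lo2 + hi2 + 1) / 2 :=
        PySem.Int.floordiv_eq_ediv_of_pos (by omega)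
      have hb1 : lo2 < PySem.Int.floordiv (lo2 + hi2 + 1) 2 := by omega
      have hb2 : PySem.Int.floordiv (lo2 + hi2 + 1) 2 ≤ hi2 := by omega
      have heq : maxCountB_searchGo s maxSum lo (f + 1) lo2 hi2 =
          (if s + PySem.Int.floordiv ((PySem.Int.floordiv (lo2 + hi2 + 1) 2 + lo) *
                (PySem.Int.floordiv (lo2 + hi2 + 1) 2 - lo + 1)) 2 ≤ maxSum
           then maxCountB_searchGo s maxSum lo f (PySem.Int.floordiv (lo2 + hi2 + 1) 2) hi2
           else maxCountB_searchGo s maxSum lo f lo2 (PySem.Int.floordiv (lo2 + hi2 + 1) 2 - 1)) := by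
        simp only [maxCountB_searchGo, if_pos h]
      rw [heq]
      by_cases hfit : s + PySem.Int.floordiv ((PySem.Int.floordiv (lo2 + hi2 + 1) 2 + lo) *
          (PySem.Int.floordiv (lo2 + hi2 + 1) 2 - lo + 1)) 2 ≤ maxSum
      · rw [if_pos hfit]
        have hfit' : s + tri lo (PySem.Int.floordiv (lo2 + hi2 + 1) 2) ≤ maxSum := hfit
        obtain ⟨i1, i2, i3, i4⟩ :=
          ih (PySem.Int.floordiv (lo2 + hi2 + 1) 2) hi2 (by omega) (by omega) (by omega)
        exact ⟨by omega, i2, i3, i4⟩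
      · rw [if_neg hfit]
        have hfit' : ¬ s + tri lo (PySem.Int.floordiv (lo2 + hi2 + 1) 2) ≤ maxSum := hfit
        obtain ⟨i1, i2, i3, i4⟩ :=
          ih lo2 (PySem.Int.floordiv (lo2 + hi2 + 1) 2 - 1) (by omega) (by omega) h2
        refine ⟨i1, by omega, i3, ?_⟩
        intro hlt
        by_cases hc : maxCountB_searchGo s maxSum lo f lo2 (PySem.Int.floordiv (lo2 + hi2 + 1) 2 - 1)
            < PySem.Int.floordiv (lo2 + hi2 + 1) 2 - 1
        · exact i4 hc
        · have he2 : maxCountB_searchGo s maxSum lo f lo2 (PySem.Int.floordiv (lo2 + hi2 + 1) 2 - 1) + 1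
              = PySem.Int.floordiv (lo2 + hi2 + 1) 2 := by omega
          rw [he2]
          omega
    · have heq : maxCountB_searchGo s maxSum lo (f + 1) lo2 hi2 = lo2 := by
        simp only [maxCountB_searchGo, if_neg h]
      rw [heq]
      exact ⟨le_rfl, by omega, h2, by omega⟩

theorem search_spec (s maxSum lo lo2 hi2 : Int) (h1 : lo2 ≤ hi2) (h2 : tri lo lo2 ≤ maxSum - s) :
    lo2 ≤ maxCountB_search s maxSum lo lo2 hi2 ∧
    maxCountB_search s maxSum lo lo2 hi2 ≤ hi2 ∧
    tri lo (maxCountB_search s maxSum lo lo2 hi2) ≤ maxSum - s ∧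
    (maxCountB_search s maxSum lo lo2 hi2 < hi2 →
      maxSum - s < tri lo (maxCountB_search s maxSum lo lo2 hi2 + 1)) := by
  unfold maxCountB_search
  exact search_specGo s maxSum lo (hi2 - lo2).toNat lo2 hi2 le_rfl h1 h2

-- A's greedy walk over the banned-free run [lo, hi] (possibly empty), characterized by
-- the greatest k in [lo-1, hi] whose prefix sum fits the budget m
theorem gapA_run (bset : List Int) (n : Int) :
    ∀ d : Nat, ∀ lo c m k hi : Int, (hi + 1 - lo).toNat = d →
    1 ≤ lo → lo ≤ hi + 1 → hi ≤ n →
    (∀ i, lo ≤ i → i ≤ hi → bset.contains i = false) →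
    lo - 1 ≤ k → k ≤ hi →
    (lo ≤ k → tri lo k ≤ m) → (k < hi → m < tri lo (k + 1)) →
    maxCountA_go bset (n + 1 - lo).toNat lo c m =
      (if k < hi then c + (k - lo + 1)
       else maxCountA_go bset (n - hi).toNat (hi + 1) (c + (k - lo + 1)) (m - tri lo k)) := by
  intro d
  induction d with
  | zero =>
    intro lo c m k hi hd h1 h2 hn hban hk1 hk2 hfit hstop
    rw [if_neg (by omega : ¬ k < hi)]
    have hk : k = lo - 1 := by omega
    have e2 : tri lo k = 0 := by rw [hk]; exact tri_base lo
    congr 1 <;> omega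
  | succ d ih =>
    intro lo c m k hi hd h1 h2 hn hban hk1 hk2 hfit hstop
    have hlh : lo ≤ hi := by omega
    rw [(by omega : ((n:Int) + 1 - lo).toNat = (n + 1 - (lo + 1)).toNat + 1)]
    simp only [maxCountA_go]
    rw [hban lo le_rfl hlh]
    simp only [Bool.false_eq_true, if_false]
    by_cases hklo : lo ≤ k
    · have hlom : lo ≤ m := by
        have h5 := tri_mono lo lo k (by omega) (by omega) hklo
        have h6 := tri_self lo
        have h7 := hfit hklo
        omega
      rw [if_pos hlom]
      have hsh := tri_shift lo k
      have hsh1 := tri_shift lo (k + 1)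
      have ihh := ih (lo + 1) (c + 1) (m - lo) k hi (by omega) (by omega) (by omega) hn
        (fun i hi1 hi2 => hban i (by omega) hi2)
        (by omega) hk2
        (fun hlk => by have h7 := hfit hklo; omega)
        (fun hkh => by have h8 := hstop hkh; omega)
      rw [ihh]
      split_ifs with hkh
      · omega
      · have e1 : c + 1 + (k - (lo + 1) + 1) = c + (k - lo + 1) := by omega
        have e2 : m - lo - tri (lo + 1) k = m - tri lo k := by omega
        rw [e1, e2]
    · have hk : k = lo - 1 := by omega
      have hkhi : k < hi := by omega
      have hm : m < lo := by
        have h8 := hstop hkhi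
        have h6 : tri lo (k + 1) = lo := by
          rw [hk, (by omega : lo - 1 + 1 = lo)]
          exact tri_self lo
        omega
      rw [if_neg (by omega : ¬ lo ≤ m), if_pos hkhi]
      omega

-- the main gap-by-gap correspondence
theorem main_loop (maxSum : Int) (bset : List Int) (n : Int) :
    ∀ bs : List Int, ∀ prev c s : Int,
    0 ≤ prev →
    bs.Pairwise (· < ·) →
    (∀ b ∈ bs, prev < b ∧ b ≤ n) →
    (∀ i, prev < i → i ≤ n → bset.contains i = true → i ∈ bs) →
    (∀ b ∈ bs, bset.contains b = true) →
    maxCountA_go bset (n - prev).toNat (prev + 1) c (maxSum - s) =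
      maxCountB_go maxSum (bs ++ [n + 1]) c s prev := by
  have hnil0 : ∀ c2 s2 p2 : Int, maxCountB_go maxSum [] c2 s2 p2 = c2 := fun _ _ _ => rfl
  have hcons0 : ∀ (b2 : Int) (rest2 : List Int) (c2 s2 p2 : Int),
      maxCountB_go maxSum (b2 :: rest2) c2 s2 p2 =
      (if p2 + 1 ≤ b2 - 1 then
        (if s2 + (p2 + 1) > maxSum then c2
         else
           (if maxCountB_search s2 maxSum (p2 + 1) (p2 + 1) (b2 - 1) < b2 - 1 then
              c2 + (maxCountB_search s2 maxSum (p2 + 1) (p2 + 1) (b2 - 1) - (p2 + 1) + 1)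
            else
              maxCountB_go maxSum rest2
                (c2 + (maxCountB_search s2 maxSum (p2 + 1) (p2 + 1) (b2 - 1) - (p2 + 1) + 1))
                (s2 + tri (p2 + 1) (maxCountB_search s2 maxSum (p2 + 1) (p2 + 1) (b2 - 1)))
                b2))
       else maxCountB_go maxSum rest2 c2 s2 b2) := fun _ _ _ _ _ => rfl
  intro bs
  induction bs with
  | nil =>
    intro prev c s hprev hpw hmem hcov hcon
    rw [List.nil_append, hcons0]
    simp only [hnil0]
    have hban : ∀ i, prev + 1 ≤ i → i ≤ n → bset.contains i = false := by
      intro i hi1 hi2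
      cases hc : bset.contains i with
      | false => rfl
      | true => exact absurd (hcov i (by omega) hi2 hc) (by simp)
    rw [(by omega : (n : Int) + 1 - 1 = n)]
    by_cases hgap : prev + 1 ≤ n
    · by_cases hbad : s + (prev + 1) > maxSum
      · rw [if_pos hgap, if_pos hbad]
        have hrun := gapA_run bset n (n + 1 - (prev + 1)).toNat (prev + 1) c (maxSum - s)
          (prev + 1 - 1) n rfl (by omega) (by omega) le_rfl hban (by omega) (by omega)
          (by omega) (fun _ => by
            rw [(by omega : prev + 1 - 1 + 1 = prev + 1), tri_self]; omega)
        rw [(by omega : ((n:Int) - prev).toNat = (n + 1 - (prev + 1)).toNat), hrun,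
          if_pos (by omega : prev + 1 - 1 < n)]
        omega
      · rw [if_pos hgap, if_neg hbad]
        obtain ⟨k1, k2, k3, k4⟩ := search_spec s maxSum (prev + 1)
          (prev + 1) n (by omega) (by rw [tri_self]; omega)
        have hrun := gapA_run bset n (n + 1 - (prev + 1)).toNat (prev + 1) c (maxSum - s)
          (maxCountB_search s maxSum (prev + 1) (prev + 1) n) n rfl (by omega) (by omega)
          le_rfl hban (by omega) k2 (fun _ => k3) (fun h => by have h9 := k4 h; omega)
        rw [(by omega : ((n:Int) - prev).toNat = (n + 1 - (prev + 1)).toNat), hrun]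
        split_ifs with hkh
        · rfl
        · rw [(by omega : ((n:Int) - n).toNat = 0)]
          simp only [maxCountA_go]
    · rw [if_neg hgap]
      rw [(by omega : ((n:Int) - prev).toNat = 0)]
      simp only [maxCountA_go]
  | cons b bs' ih =>
    intro prev c s hprev hpw hmem hcov hcon
    obtain ⟨hbp, hbn⟩ := hmem b (by simp)
    have hpw' := (List.pairwise_cons.mp hpw).2
    have hblt := (List.pairwise_cons.mp hpw).1
    have hcon' : bset.contains b = true := hcon b (by simp)
    have hban : ∀ i, prev + 1 ≤ i → i ≤ b - 1 → bset.contains i = false := by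
      intro i hi1 hi2
      cases hc : bset.contains i with
      | false => rfl
      | true =>
        have hmem2 := hcov i (by omega) (by omega) hc
        rcases List.mem_cons.mp hmem2 with he | ht
        · omega
        · have h9 := hblt i ht; omega
    rw [List.cons_append, hcons0]
    have ihh := fun c2 s2 => ih b c2 s2 (by omega) hpw'
      (fun x hx => ⟨hblt x hx, (hmem x (List.mem_cons_of_mem b hx)).2⟩)
      (fun i hi1 hi2 hc => by
        rcases List.mem_cons.mp (hcov i (by omega) hi2 hc) with he | ht
        · omega
        · exact ht)
      (fun x hx => hcon x (List.mem_cons_of_mem b hx))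
    by_cases hgap : prev + 1 ≤ b - 1
    · by_cases hbad : s + (prev + 1) > maxSum
      · rw [if_pos hgap, if_pos hbad]
        have hrun := gapA_run bset n
          (b - (prev + 1)).toNat (prev + 1) c (maxSum - s) (prev + 1 - 1) (b - 1)
          (by omega) (by omega) (by omega) (by omega) hban (by omega) (by omega) (by omega)
          (fun _ => by rw [(by omega : prev + 1 - 1 + 1 = prev + 1), tri_self]; omega)
        rw [(by omega : ((n:Int) - prev).toNat = (n + 1 - (prev + 1)).toNat), hrun,
          if_pos (by omega : prev + 1 - 1 < b - 1)]
        omega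
      · rw [if_pos hgap, if_neg hbad]
        obtain ⟨k1, k2, k3, k4⟩ := search_spec s maxSum (prev + 1)
          (prev + 1) (b - 1) (by omega) (by rw [tri_self]; omega)
        have hrun := gapA_run bset n
          (b - (prev + 1)).toNat (prev + 1) c (maxSum - s)
          (maxCountB_search s maxSum (prev + 1) (prev + 1) (b - 1)) (b - 1)
          (by omega) (by omega) (by omega) (by omega) hban (by omega) k2 (fun _ => k3)
          (fun h => by have h9 := k4 h; omega)
        rw [(by omega : ((n:Int) - prev).toNat = (n + 1 - (prev + 1)).toNat), hrun]
        split_ifs with hkh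
        · rfl
        · rw [(by omega : ((n:Int) - (b - 1)).toNat = (n - b).toNat + 1)]
          simp only [maxCountA_go]
          rw [(by omega : (b:Int) - 1 + 1 = b), hcon']
          simp only [if_true]
          have e : maxSum - s - tri (prev + 1) (maxCountB_search s maxSum (prev + 1) (prev + 1) (b - 1))
              = maxSum - (s + tri (prev + 1) (maxCountB_search s maxSum (prev + 1) (prev + 1) (b - 1))) := by
            omega
          rw [e]
          exact ihh _ _
    · rw [if_neg hgap]
      rw [(by omega : prev + 1 = b), (by omega : ((n:Int) - prev).toNat = (n - b).toNat + 1)]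
      simp only [maxCountA_go]
      rw [hcon']
      simp only [if_true]
      exact ihh c s

-- ===== VERDICT (by name: the statement is the Claim_ definition above) =====
theorem maxCount_spec : Claim_equal_maxCount := by
  intro banned n maxSum _
  unfold Spec_maxCount
  have hA : maxCount banned n maxSum =
      maxCountA_go (PySem.Set.ofList banned) (n + 1 - 1).toNat 1 0 maxSum := rfl
  have hB : maxCount_alt banned n maxSum =
      maxCountB_go maxSum
        ((PySem.List.sorted (PySem.Set.ofList (banned.filter (fun b => decide (1 ≤ b ∧ b ≤ n))))
          (fun x => x) false) ++ [n + 1]) 0 0 0 := rfl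
  rw [hA, hB]
  have h := main_loop maxSum (PySem.Set.ofList banned) n
    (PySem.List.sorted (PySem.Set.ofList (banned.filter (fun b => decide (1 ≤ b ∧ b ≤ n))))
      (fun x => x) false) 0 0 0 le_rfl
    (PySem.List.sorted_ofList_pairwise_lt _)
    (by
      intro b hb
      simp only [PySem.List.mem_sorted, PySem.Set.mem_ofList, List.mem_filter,
        decide_eq_true_eq] at hb
      omega)
    (by
      intro i h0 hn hc
      have hi : i ∈ banned := (PySem.Set.mem_ofList _ _).mp (List.contains_iff_mem.mp hc)
      simp only [PySem.List.mem_sorted, PySem.Set.mem_ofList, List.mem_filter,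
        decide_eq_true_eq]
      exact ⟨hi, by omega⟩)
    (by
      intro b hb
      simp only [PySem.List.mem_sorted, PySem.Set.mem_ofList, List.mem_filter,
        decide_eq_true_eq] at hb
      exact List.contains_iff_mem.mpr ((PySem.Set.mem_ofList _ _).mpr hb.1))
  rw [(by omega : (0 : Int) + 1 = 1), (by omega : maxSum - 0 = maxSum),
    (by omega : ((n:Int) - 0).toNat = (n + 1 - 1).toNat)] at h
  exact h
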